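-- pv_equiv track=rewrite | github.com/Nickalus12/RapidApply | modules/ai/question_handler.py | _select_best_option
-- ===== SOURCE A (Python) =====
-- from typing import Dict, List, Tuple, Optional, Any
--
-- def _select_best_option(options: List[str]) -> str:
--     """Intelligently selects the best option from available choices"""
--     # Filter out placeholder options
--     valid_options = [opt for opt in options if opt.lower() not in ['select', 'choose', 'pick', '--select--', 'please select']]
--
--     if not valid_options:
--         return options[0] if options else ''
--
--     # Prefer positive options
--     positive_keywords = ['yes', 'agree', 'confirm', 'available', 'willing', 'able', 'authorized']
--     for option in valid_options:
--         if any(keyword in option.lower() for keyword in positive_keywords):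
--             return option
--
--     # Return first valid option
--     return valid_options[0]
-- ===== SOURCE B (Python) =====
-- def _select_best_option(options):
--     """Score each option (placeholder=0, positive=2, other valid=1) and return
--     the earliest option of maximal score; empty input yields ''."""
--     if not options:
--         return ''
--
--     def score(opt):
--         low = opt.lower()
--         if low in ('select', 'choose', 'pick', '--select--', 'please select'):
--             return 0
--         if any(k in low for k in
--                ('yes', 'agree', 'confirm', 'available', 'willing', 'able', 'authorized')):
--             return 2
--         return 1
--
--     return max(options, key=score)
-- ===== Notes on version B (the rewrite author's own statement) =====
-- stated objective: alternative
-- what changed: B replaces A's filter-then-rescan staging with a scoring argmax: each option gets a rank (placeholder 0, positive 2, other valid 1) and max(options, key=score) returns the earliest maximal option.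
import Mathlib
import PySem

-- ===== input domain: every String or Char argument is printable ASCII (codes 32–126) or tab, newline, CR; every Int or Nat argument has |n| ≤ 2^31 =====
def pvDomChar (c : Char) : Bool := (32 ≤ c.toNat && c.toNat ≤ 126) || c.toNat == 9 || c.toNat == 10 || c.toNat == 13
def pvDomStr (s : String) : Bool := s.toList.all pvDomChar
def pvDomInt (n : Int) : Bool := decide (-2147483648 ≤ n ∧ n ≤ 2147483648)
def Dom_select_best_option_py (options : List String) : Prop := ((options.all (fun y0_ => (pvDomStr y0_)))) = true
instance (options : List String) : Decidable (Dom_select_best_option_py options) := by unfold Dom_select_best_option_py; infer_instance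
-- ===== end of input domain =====

-- B replaces A's filter-then-rescan staging with a scoring argmax (max with a key);
-- objective: alternative decomposition.

-- ===== PORT A =====
def pvPlaceholdersA : List String := ["select", "choose", "pick", "--select--", "please select"]
def pvPositiveA : List String := ["yes", "agree", "confirm", "available", "willing", "able", "authorized"]

def select_best_option_py (options : List String) : String :=
  let valid_options := options.filter (fun opt => !(pvPlaceholdersA.contains (PySem.Str.lower opt)))
  if valid_options.isEmpty then
    match options with
    | [] => ""
    | o :: _ => o
  else
    match valid_options.find? (fun option => pvPositiveA.any (fun keyword => PySem.Str.isIn keyword (PySem.Str.lower option))) with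
    | some option => option
    | none => valid_options.headD ""

-- ===== PORT B =====
-- Source B's score(opt): placeholder -> 0, positive -> 2, other valid -> 1
def pvScore (opt : String) : Int :=
  let low := PySem.Str.lower opt
  if ["select", "choose", "pick", "--select--", "please select"].contains low then 0
  else if ["yes", "agree", "confirm", "available", "willing", "able", "authorized"].any
      (fun k => PySem.Str.isIn k low) then 2
  else 1

def select_best_option_py_alt (options : List String) : String :=
  match options with
  | [] => ""
  | _ => (PySem.List.max? options pvScore).getD ""

-- ===== PRECONDITION & SPEC =====
def Spec_select_best_option_py (options : List String) (out : String) : Prop := out = select_best_option_py_alt options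
instance (options : List String) (out : String) : Decidable (Spec_select_best_option_py options out) := by unfold Spec_select_best_option_py; infer_instance

-- ===== CLAIM (what is proved, stated in full; the proofs are below) =====
def Claim_equal_select_best_option_py : Prop := ∀ (options : List String), Dom_select_best_option_py options → Spec_select_best_option_py options (select_best_option_py options)

-- ===== LEMMAS AND PROOFS =====

def pvValid (opt : String) : Bool := !(pvPlaceholdersA.contains (PySem.Str.lower opt))

def pvPos (opt : String) : Bool :=
  pvPositiveA.any (fun keyword => PySem.Str.isIn keyword (PySem.Str.lower opt))

-- the common selection spec: first score-2 option, else first score-1 option, else d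
def pvSel (l : List String) (d : String) : String :=
  match l.find? (fun x => pvScore x == 2) with
  | some y => y
  | none =>
    match l.find? (fun x => pvScore x == 1) with
    | some y => y
    | none => d

theorem pvScore_cases (o : String) :
    (pvScore o = 0 ∧ pvValid o = false) ∨
    (pvScore o = 2 ∧ pvValid o = true ∧ pvPos o = true) ∨
    (pvScore o = 1 ∧ pvValid o = true ∧ pvPos o = false) := by
  unfold pvScore pvValid pvPos pvPlaceholdersA pvPositiveA
  dsimp only
  split_ifs with h1 h2
  · left; exact ⟨rfl, by rw [h1]; rfl⟩
  · rw [Bool.not_eq_true] at h1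
    right; left; exact ⟨rfl, by rw [h1]; rfl, h2⟩
  · rw [Bool.not_eq_true] at h1
    rw [Bool.not_eq_true] at h2
    right; right; exact ⟨rfl, by rw [h1]; rfl, h2⟩

-- B's running-argmax computes pvSel with the current best as head/default
theorem pvFold_sel (t : List String) (m : String) :
    PySem.List.max? (m :: t) pvScore = some (pvSel (m :: t) m) := by
  induction t generalizing m with
  | nil =>
    rcases pvScore_cases m with ⟨h, _⟩ | ⟨h, _⟩ | ⟨h, _⟩ <;>
      simp [PySem.List.max?, pvSel, List.find?, h]
  | cons x r ih =>
    have key : PySem.List.max? (m :: x :: r) pvScore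
        = PySem.List.max? ((if pvScore m < pvScore x then x else m) :: r) pvScore := by
      by_cases h : pvScore m < pvScore x <;> simp [PySem.List.max?, h]
    rcases pvScore_cases m with ⟨hm, _⟩ | ⟨hm, _⟩ | ⟨hm, _⟩ <;>
      rcases pvScore_cases x with ⟨hx, _⟩ | ⟨hx, _⟩ | ⟨hx, _⟩ <;>
      rw [key, ih] <;>
      simp only [hm, hx, show ¬((0:Int) < 0) from by norm_num,
        show ((0:Int) < 2) from by norm_num, show ((0:Int) < 1) from by norm_num,
        show ¬((2:Int) < 0) from by norm_num, show ¬((2:Int) < 2) from by norm_num,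
        show ¬((2:Int) < 1) from by norm_num, show ¬((1:Int) < 0) from by norm_num,
        show ((1:Int) < 2) from by norm_num, show ¬((1:Int) < 1) from by norm_num,
        if_true, if_false, if_pos, if_neg, ite_true, ite_false] <;>
      (first
        | rfl
        | (simp only [pvSel, List.find?, hm, hx, show ((0:Int) == 2) = false from rfl,
            show ((1:Int) == 2) = false from rfl, show ((2:Int) == 2) = true from rfl,
            show ((0:Int) == 1) = false from rfl, show ((1:Int) == 1) = true from rfl,
            show ((2:Int) == 1) = false from rfl] <;>
           (first | rfl
                  | (cases r.find? (fun y => pvScore y == 2) <;>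
                      cases r.find? (fun y => pvScore y == 1) <;> rfl))))

-- A's positive scan over the filtered list is the first score-2 element
theorem pvFind_filter (l : List String) :
    (l.filter pvValid).find? pvPos = l.find? (fun x => pvScore x == 2) := by
  induction l with
  | nil => rfl
  | cons o r ih =>
    rcases pvScore_cases o with ⟨hs, hv⟩ | ⟨hs, hv, hp⟩ | ⟨hs, hv, hp⟩
    · simp [List.filter_cons, List.find?, hs, hv, ih]
    · simp [List.filter_cons, List.find?, hs, hv, hp, ih]
    · simp [List.filter_cons, List.find?, hs, hv, hp, ih]

-- with no score-2 element, A's first valid option is the first score-1 element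
theorem pvHead_filter (l : List String) (h : l.find? (fun x => pvScore x == 2) = none) :
    (l.filter pvValid).headD "" =
      match l.find? (fun x => pvScore x == 1) with
      | some y => y
      | none => "" := by
  induction l with
  | nil => rfl
  | cons o r ih =>
    rw [List.find?_cons] at h
    rcases pvScore_cases o with ⟨hs, hv⟩ | ⟨hs, hv, _⟩ | ⟨hs, hv, _⟩
    · simp only [hs] at h
      simp only [List.filter_cons, hv, Bool.false_eq_true, if_false, List.find?, hs]
      exact ih (by simpa using h)
    · simp [hs] at h
    · simp [List.filter_cons, hv, List.find?, hs]

-- all-placeholder inputs: both find?s are none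
theorem pvAllPlace (l : List String) (h : l.filter pvValid = []) :
    l.find? (fun x => pvScore x == 2) = none ∧ l.find? (fun x => pvScore x == 1) = none := by
  induction l with
  | nil => exact ⟨rfl, rfl⟩
  | cons o r ih =>
    rw [List.filter_cons] at h
    rcases pvScore_cases o with ⟨hs, hv⟩ | ⟨hs, hv, _⟩ | ⟨hs, hv, _⟩
    · simp only [hv, Bool.false_eq_true, if_false] at h
      obtain ⟨h2, h1⟩ := ih h
      constructor <;> simp [List.find?, hs, h2, h1]
    · simp [hv] at h
    · simp [hv] at h

-- ===== VERDICT (by name: the statement is the Claim_ definition above) =====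
theorem select_best_option_py_spec : Claim_equal_select_best_option_py := by
  intro options _
  unfold Spec_select_best_option_py select_best_option_py select_best_option_py_alt
  cases options with
  | nil => rfl
  | cons o t =>
    have hB : PySem.List.max? (o :: t) pvScore = some (pvSel (o :: t) o) := pvFold_sel t o
    simp only [hB, Option.getD_some]
    rw [show (fun opt => !(pvPlaceholdersA.contains (PySem.Str.lower opt))) = pvValid from rfl]
    rw [show (fun option => pvPositiveA.any (fun keyword =>
        PySem.Str.isIn keyword (PySem.Str.lower option))) = pvPos from rfl]
    by_cases hemp : (o :: t).filter pvValid = []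
    · obtain ⟨h2, h1⟩ := pvAllPlace _ hemp
      simp [hemp, pvSel, h2, h1]
    · have hne : ((o :: t).filter pvValid).isEmpty = false := by
        cases hfe : (o :: t).filter pvValid with
        | nil => exact absurd hfe hemp
        | cons _ _ => rfl
      simp only [hne, Bool.false_eq_true, if_false, pvFind_filter]
      unfold pvSel
      cases h2 : (o :: t).find? (fun x => pvScore x == 2) with
      | some y => rfl
      | none =>
        have hhd := pvHead_filter (o :: t) h2
        rw [hhd]
        cases h1 : (o :: t).find? (fun x => pvScore x == 1) with
        | some y => rfl
        | none =>
          -- no score-2 and no score-1 element contradicts a nonempty filtered list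
          exfalso
          apply hemp
          cases hfe : (o :: t).filter pvValid with
          | nil => rfl
          | cons v vs =>
            exfalso
            have hvmem : v ∈ (o :: t).filter pvValid := by rw [hfe]; exact List.mem_cons_self
            rw [List.mem_filter] at hvmem
            rcases pvScore_cases v with ⟨_, hv⟩ | ⟨hs, _, _⟩ | ⟨hs, _, _⟩
            · rw [hvmem.2] at hv; exact Bool.true_eq_false.mp hv
            · have := List.find?_eq_none.mp h2 v hvmem.1
              simp [hs] at this
            · have := List.find?_eq_none.mp h1 v hvmem.1
              simp [hs] at this
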